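-- pv_equiv track=rewrite | github.com/DeepProofLog/Batched_Env | env_v4.py | get_binding
-- ===== SOURCE A (Python) =====
-- from typing import List, Optional, Tuple, Dict, Any, Set, Union, NamedTuple
--
-- def get_binding(var_idx: int,
--                 subs_dict: Dict[int, int],
--                 visited: Set[int],
--                 vars_idx_set: Set[int], # Set of POSITIVE variable indices
--                 max_depth: int = 20
--                 ) -> Optional[int]:
--     """ Finds ultimate binding. Uses vars_idx_set to identify variables. """
--     # Base case: If it's not a variable in the set OR it's a variable not currently bound
--     if var_idx not in vars_idx_set or var_idx not in subs_dict:
--         return var_idx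
--
--     # Cycle detection / Depth limit
--     if var_idx in visited: return None
--     if len(visited) > max_depth: return None
--
--     visited.add(var_idx)
--     next_val = subs_dict[var_idx]
--     # Recursively find the binding of the next value
--     result = get_binding(next_val, subs_dict, visited, vars_idx_set, max_depth)
--     visited.remove(var_idx) # Backtrack
--
--     return result
-- ===== SOURCE B (Python) =====
-- def get_binding(var_idx, subs_dict, visited, vars_idx_set, max_depth=20):
--     """Iterative chain-chasing: keep the vars seen in THIS call in a local
--     path list; depth is len(visited) + len(path); no mutation of visited."""
--     base = len(visited)
--     path = []
--     while var_idx in vars_idx_set and var_idx in subs_dict: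
--         if var_idx in visited or var_idx in path:
--             return None
--         if base + len(path) > max_depth:
--             return None
--         path.append(var_idx)
--         var_idx = subs_dict[var_idx]
--     return var_idx
-- ===== Notes on version B (the rewrite author's own statement) =====
-- stated objective: idiomatic
-- what changed: Replaces the recursion that mutates and restores the visited set with an iterative while-loop keeping a local path list; cycle check is membership in visited-or-path and the depth limit is len(visited)+len(path), so the caller's set is never touched.
import Mathlib
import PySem

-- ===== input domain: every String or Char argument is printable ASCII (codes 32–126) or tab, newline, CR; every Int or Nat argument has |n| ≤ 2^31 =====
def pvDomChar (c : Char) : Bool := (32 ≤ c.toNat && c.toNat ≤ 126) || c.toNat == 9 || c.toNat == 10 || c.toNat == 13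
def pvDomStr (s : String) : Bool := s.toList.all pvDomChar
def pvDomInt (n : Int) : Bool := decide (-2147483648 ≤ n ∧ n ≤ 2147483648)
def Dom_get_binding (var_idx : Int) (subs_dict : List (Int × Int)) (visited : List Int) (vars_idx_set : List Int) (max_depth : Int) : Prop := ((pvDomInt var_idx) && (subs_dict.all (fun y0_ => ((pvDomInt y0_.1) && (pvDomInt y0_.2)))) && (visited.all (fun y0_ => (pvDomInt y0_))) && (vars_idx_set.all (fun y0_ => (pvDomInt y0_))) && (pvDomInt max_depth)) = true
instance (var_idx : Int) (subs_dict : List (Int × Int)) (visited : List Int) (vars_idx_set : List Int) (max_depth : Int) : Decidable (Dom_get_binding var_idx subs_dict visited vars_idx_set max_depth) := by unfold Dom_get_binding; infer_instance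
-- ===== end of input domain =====

-- B replaces A's mutate-and-restore recursion by an iterative loop over a local path list
-- (cycle check = membership in visited or path, depth = |visited| + |path|); same values, no mutation.


-- ===== PORT A =====
-- Literal port of A: the mutate/restore of the Python set becomes recursing on
-- PySem.Set.add visited var_idx (the restore is invisible in the returned value).
def get_binding (var_idx : Int) (subs_dict : List (Int × Int)) (visited : List Int) (vars_idx_set : List Int) (max_depth : Int) : Option Int :=
  if var_idx ∉ vars_idx_set ∨ PySem.Dict.get? (PySem.Dict.mk subs_dict) var_idx = none then some var_idx
  else if _h1 : var_idx ∈ visited then none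
  else if _h2 : (visited.length : Int) > max_depth then none
  else
    match PySem.Dict.get? (PySem.Dict.mk subs_dict) var_idx with
    | some next_val => get_binding next_val subs_dict (PySem.Set.add visited var_idx) vars_idx_set max_depth
    | none => some var_idx   -- unreachable: the first branch handled dict misses
termination_by (max_depth + 1 - visited.length).toNat
decreasing_by
  simp only [PySem.Set.add, PySem.Set.contains, List.contains_eq_mem, decide_eq_true_eq,
    if_neg _h1, List.length_append, List.length_cons, List.length_nil]
  omega

-- ===== PORT B =====
-- B's loop: path holds the variables followed in this call, in order.
def gbLoop (subs_dict : List (Int × Int)) (visited : List Int) (vars_idx_set : List Int) (max_depth : Int) (var_idx : Int) (path : List Int) : Option Int :=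
  if var_idx ∈ vars_idx_set then
    match PySem.Dict.get? (PySem.Dict.mk subs_dict) var_idx with
    | some next_val =>
      if var_idx ∈ visited ∨ var_idx ∈ path then none
      else if _h2 : (visited.length : Int) + path.length > max_depth then none
      else gbLoop subs_dict visited vars_idx_set max_depth next_val (path ++ [var_idx])
    | none => some var_idx
  else some var_idx
termination_by (max_depth + 1 - visited.length - path.length).toNat
decreasing_by
  simp only [List.length_append, List.length_cons, List.length_nil]
  omega

def get_binding_alt (var_idx : Int) (subs_dict : List (Int × Int)) (visited : List Int) (vars_idx_set : List Int) (max_depth : Int) : Option Int :=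
  gbLoop subs_dict visited vars_idx_set max_depth var_idx []

-- ===== PRECONDITION & SPEC =====
def Spec_get_binding (var_idx : Int) (subs_dict : List (Int × Int)) (visited : List Int) (vars_idx_set : List Int) (max_depth : Int) (out : Option Int) : Prop := out = get_binding_alt var_idx subs_dict visited vars_idx_set max_depth
instance (var_idx : Int) (subs_dict : List (Int × Int)) (visited : List Int) (vars_idx_set : List Int) (max_depth : Int) (out : Option Int) : Decidable (Spec_get_binding var_idx subs_dict visited vars_idx_set max_depth out) := by unfold Spec_get_binding; infer_instance

-- ===== CLAIM (what is proved, stated in full; the proofs are below) =====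
def Claim_equal_get_binding : Prop := ∀ (var_idx : Int) (subs_dict : List (Int × Int)) (visited : List Int) (vars_idx_set : List Int) (max_depth : Int), Dom_get_binding var_idx subs_dict visited vars_idx_set max_depth → Spec_get_binding var_idx subs_dict visited vars_idx_set max_depth (get_binding var_idx subs_dict visited vars_idx_set max_depth)

-- ===== LEMMAS AND PROOFS =====

-- A started on visited ++ path computes exactly B's loop state (var_idx, path):
-- membership splits by List.mem_append and lengths add.
theorem gbLoop_eq_get_binding (subs_dict : List (Int × Int)) (visited0 : List Int) (vars_idx_set : List Int) (max_depth : Int) :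
    ∀ (k : Nat) (var_idx : Int) (path : List Int),
      (max_depth + 1 - visited0.length - path.length).toNat ≤ k →
      get_binding var_idx subs_dict (visited0 ++ path) vars_idx_set max_depth
        = gbLoop subs_dict visited0 vars_idx_set max_depth var_idx path := by
  intro k
  induction k with
  | zero =>
    intro var_idx path hk
    rw [get_binding, gbLoop]
    by_cases hv : var_idx ∈ vars_idx_set
    · rw [if_pos hv]
      cases hget : PySem.Dict.get? (PySem.Dict.mk subs_dict) var_idx with
      | none => simp [hv]
      | some nv =>
        rw [if_neg (by simp [hv, hget])]
        simp only [hget]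
        by_cases hmv : var_idx ∈ visited0 ++ path
        · rw [dif_pos hmv, if_pos (List.mem_append.1 hmv)]
        · rw [dif_neg hmv, if_neg (by rw [List.mem_append] at hmv; exact hmv)]
          have hlen : ((visited0 ++ path).length : Int) > max_depth := by
            rw [List.length_append]; push_cast; omega
          rw [dif_pos hlen,
            dif_pos (by rw [List.length_append] at hlen; push_cast at hlen ⊢; omega)]
    · rw [if_neg hv, if_pos (Or.inl hv)]
  | succ n ih =>
    intro var_idx path hk
    rw [get_binding, gbLoop]
    by_cases hv : var_idx ∈ vars_idx_set
    · rw [if_pos hv]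
      cases hget : PySem.Dict.get? (PySem.Dict.mk subs_dict) var_idx with
      | none => simp [hv]
      | some nv =>
        rw [if_neg (by simp [hv, hget])]
        simp only [hget]
        by_cases hmv : var_idx ∈ visited0 ++ path
        · rw [dif_pos hmv, if_pos (List.mem_append.1 hmv)]
        · rw [dif_neg hmv, if_neg (by rw [List.mem_append] at hmv; exact hmv)]
          by_cases hlen : ((visited0 ++ path).length : Int) > max_depth
          · rw [dif_pos hlen,
              dif_pos (by rw [List.length_append] at hlen; push_cast at hlen ⊢; omega)]
          · rw [dif_neg hlen,
              dif_neg (by rw [List.length_append] at hlen; push_cast at hlen ⊢; omega)]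
            have hadd : PySem.Set.add (visited0 ++ path) var_idx
                = visited0 ++ (path ++ [var_idx]) := by
              simp [PySem.Set.add, PySem.Set.contains, List.contains_eq_mem, hmv,
                List.append_assoc]
            rw [hadd]
            refine ih nv (path ++ [var_idx]) ?_
            rw [List.length_append] at hlen
            simp only [List.length_append, List.length_cons, List.length_nil]
            push_cast at hlen ⊢
            omega
    · rw [if_neg hv, if_pos (Or.inl hv)]

-- ===== VERDICT (by name: the statement is the Claim_ definition above) =====
theorem get_binding_spec : Claim_equal_get_binding := by
  intro var_idx subs_dict visited vars_idx_set max_depth _hDom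
  unfold Spec_get_binding get_binding_alt
  have h := gbLoop_eq_get_binding subs_dict visited vars_idx_set max_depth
    (max_depth + 1 - visited.length - ([] : List Int).length).toNat var_idx [] le_rfl
  simpa using h
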